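-- pv_equiv track=rewrite | github.com/evgeniy-kulikov/Stepik_Python-course-for-professionals | 02 Повторяем Python/2.2 Повторяем Python. Часть 2.py | sum_weights
-- ===== SOURCE A (Python) =====
-- def sum_weights(weights: list) -> str:
--     """
--     Перевод всех размеров файлов в наименьшую ед. измерения (B)
--     - Суммирование ед. измерения
--     - Постепенный перевод во всё большие ед. измерения по математическому округлению.
--     - Таким образом определяется итоговый вес всех файлов этой группы
--     """
--     total = [0, 'B']
--     # Перевод в Байты с суммированием
--     for weight in weights:
--         if weight[1] == 'B':
--             total[0] += int(weight[0])
--         elif weight[1] == 'KB':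
--             total[0] += int(weight[0]) * 1024
--         elif weight[1] == 'MB':
--             total[0] += int(weight[0]) * 1024 ** 2
--         elif weight[1] == 'GB':
--             total[0] += int(weight[0]) * 1024 ** 3
--     # Перевод Байт в большую меру
--     if total[0] >= 1024:
--         total[0] = round(total[0] / 1024)
--         total[1] = 'KB'
--     if total[0] >= 1024:
--         total[0] = round(total[0] / 1024)
--         total[1] = 'MB'
--     if total[0] >= 1024:
--         total[0] = round(total[0] / 1024)
--         total[1] = 'GB'
--     return f'{total[0]} {total[1]}'
-- ===== SOURCE B (Python) =====
-- UNITS = ('B', 'KB', 'MB', 'GB')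
--
--
-- def sum_weights(weights: list) -> str:
--     # Phase 1: group the sizes by unit (one dict of per-unit subtotals).
--     per_unit = {}
--     for size, unit in weights:
--         if unit in UNITS:
--             per_unit[unit] = per_unit.get(unit, 0) + int(size)
--     # Phase 2: scale each per-unit subtotal to bytes at once.
--     total = sum(per_unit.get(u, 0) * 1024 ** i for i, u in enumerate(UNITS))
--
--     # Phase 3: escalate recursively through the remaining larger units.
--     def escalate(value, unit, bigger):
--         if not bigger or value < 1024:
--             return f'{value} {unit}'
--         return escalate(round(value / 1024), bigger[0], bigger[1:])
--
--     return escalate(total, UNITS[0], UNITS[1:])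
-- ===== Notes on version B (the rewrite author's own statement) =====
-- stated objective: simpler
-- what changed: B groups sizes into a per-unit subtotal dict in one pass, converts the four subtotals to bytes in a single enumerate expression, and replaces A's three unrolled escalation if-blocks with a recursive helper over the remaining larger units.
import Mathlib
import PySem

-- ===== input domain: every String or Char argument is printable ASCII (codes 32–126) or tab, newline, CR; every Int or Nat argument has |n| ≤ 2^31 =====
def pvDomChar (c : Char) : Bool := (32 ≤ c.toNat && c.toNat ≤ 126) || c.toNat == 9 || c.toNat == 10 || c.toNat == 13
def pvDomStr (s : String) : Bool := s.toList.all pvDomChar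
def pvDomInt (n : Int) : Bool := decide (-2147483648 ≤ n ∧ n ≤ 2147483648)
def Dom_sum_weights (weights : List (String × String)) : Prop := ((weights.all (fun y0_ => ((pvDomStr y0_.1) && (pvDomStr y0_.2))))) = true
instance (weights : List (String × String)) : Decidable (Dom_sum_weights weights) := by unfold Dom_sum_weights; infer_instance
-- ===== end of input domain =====

-- B first groups the sizes by unit into a per-unit subtotal dict, scales the four
-- subtotals to bytes in one enumerate pass, and escalates units by structural
-- recursion over the remaining larger units (objective: simpler decomposition).

-- ===== PORT A =====
-- Model of CPython's round(m/1024) for a nonnegative int m, exact: m/1024 is the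
-- nearest double (53-bit significand, ties to even) of the rational m/2^10, and
-- round() rounds that value half-to-even.
def pyFl53 (m : Int) : Int :=
  if m < 2 ^ 53 then m
  else
    let s := m.toNat.log2 + 1 - 53
    let u : Int := 2 ^ s
    let q := m / u
    let r := m % u
    (if 2 * r > u ∨ (2 * r = u ∧ q % 2 = 1) then q + 1 else q) * u

def pyRoundDiv1024 (m : Int) : Int :=
  let f := pyFl53 m
  let q := f / 1024
  let r := f % 1024
  if 2 * r > 1024 ∨ (2 * r = 1024 ∧ q % 2 = 1) then q + 1 else q

def sum_weights (weights : List (String × String)) : String :=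
  let t0 : Int := weights.foldl (fun acc weight =>
    if weight.2 = "B" then acc + ((PySem.Int.ofStr? weight.1).getD 0)
    else if weight.2 = "KB" then acc + ((PySem.Int.ofStr? weight.1).getD 0) * 1024
    else if weight.2 = "MB" then acc + ((PySem.Int.ofStr? weight.1).getD 0) * 1024 ^ 2
    else if weight.2 = "GB" then acc + ((PySem.Int.ofStr? weight.1).getD 0) * 1024 ^ 3
    else acc) 0
  let p1 := if t0 ≥ 1024 then (pyRoundDiv1024 t0, "KB") else (t0, "B")
  let p2 := if p1.1 ≥ 1024 then (pyRoundDiv1024 p1.1, "MB") else p1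
  let p3 := if p2.1 ≥ 1024 then (pyRoundDiv1024 p2.1, "GB") else p2
  PySem.Int.toStr p3.1 ++ " " ++ p3.2

-- ===== PORT B =====
def pvUNITS : List String := ["B", "KB", "MB", "GB"]

-- Source B's 'escalate(value, unit, bigger)': structural recursion on the remaining units
def pvEscalate : Int → String → List String → String
  | value, unit, [] => PySem.Int.toStr value ++ " " ++ unit
  | value, unit, nu :: rest =>
    if value < 1024 then PySem.Int.toStr value ++ " " ++ unit
    else pvEscalate (pyRoundDiv1024 value) nu rest

def sum_weights_alt (weights : List (String × String)) : String :=
  -- phase 1: per_unit[unit] = per_unit.get(unit, 0) + int(size)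
  let perUnit : PySem.Dict String Int := weights.foldl (fun d su =>
    if pvUNITS.contains su.2 then
      d.insert su.2 (d.getD su.2 0 + (PySem.Int.ofStr? su.1).getD 0)
    else d) PySem.Dict.empty
  -- phase 2: sum(per_unit.get(u, 0) * 1024 ** i for i, u in enumerate(UNITS))
  let total : Int := (PySem.List.enumerate pvUNITS).foldl
    (fun acc iu => acc + perUnit.getD iu.2 0 * 1024 ^ iu.1.toNat) 0
  -- phase 3: escalate(total, UNITS[0], UNITS[1:])
  pvEscalate total (pvUNITS.headD "") (pvUNITS.drop 1)

-- ===== PRECONDITION & SPEC =====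
-- Pre_ excludes exactly the inputs on which Python A raises ValueError: an entry
-- whose unit is one of B/KB/MB/GB but whose size string is not a valid int literal.
def Pre_sum_weights (weights : List (String × String)) : Prop :=
  ∀ p ∈ weights, p.2 ∈ (["B", "KB", "MB", "GB"] : List String) →
    (PySem.Int.ofStr? p.1).isSome = true
instance (weights : List (String × String)) : Decidable (Pre_sum_weights weights) := by
  unfold Pre_sum_weights; infer_instance

def pvWitness_sum_weights : (List (String × String)) := [("3", "KB"), ("512", "B")]

def Spec_sum_weights (weights : List (String × String)) (out : String) : Prop := out = sum_weights_alt weights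
instance (weights : List (String × String)) (out : String) : Decidable (Spec_sum_weights weights out) := by unfold Spec_sum_weights; infer_instance

-- ===== CLAIM (what is proved, stated in full; the proofs are below) =====
def Claim_equal_sum_weights : Prop := ∀ (weights : List (String × String)), Dom_sum_weights weights → Pre_sum_weights weights → Spec_sum_weights weights (sum_weights weights)

-- ===== LEMMAS AND PROOFS =====

-- total bytes represented by a per-unit subtotal dict
def pvS (d : PySem.Dict String Int) : Int :=
  d.getD "B" 0 + d.getD "KB" 0 * 1024 + d.getD "MB" 0 * 1024 ^ 2
    + d.getD "GB" 0 * 1024 ^ 3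

-- one grouping step changes pvS by exactly A's per-element contribution
theorem pvS_step (d : PySem.Dict String Int) (su : String × String) :
    pvS (if pvUNITS.contains su.2 then
          d.insert su.2 (d.getD su.2 0 + (PySem.Int.ofStr? su.1).getD 0)
         else d)
    = (if su.2 = "B" then pvS d + ((PySem.Int.ofStr? su.1).getD 0)
       else if su.2 = "KB" then pvS d + ((PySem.Int.ofStr? su.1).getD 0) * 1024
       else if su.2 = "MB" then pvS d + ((PySem.Int.ofStr? su.1).getD 0) * 1024 ^ 2
       else if su.2 = "GB" then pvS d + ((PySem.Int.ofStr? su.1).getD 0) * 1024 ^ 3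
       else pvS d) := by
  obtain ⟨w, u⟩ := su
  by_cases h1 : u = "B"
  · subst h1; simp [pvS, pvUNITS, PySem.Dict.getD_insert]; ring
  by_cases h2 : u = "KB"
  · subst h2; simp [pvS, pvUNITS, PySem.Dict.getD_insert]; ring
  by_cases h3 : u = "MB"
  · subst h3; simp [pvS, pvUNITS, PySem.Dict.getD_insert]; ring
  by_cases h4 : u = "GB"
  · subst h4; simp [pvS, pvUNITS, PySem.Dict.getD_insert]; ring
  · have hn : u ∉ pvUNITS := by simp [pvUNITS, h1, h2, h3, h4]
    simp [hn, h1, h2, h3, h4]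

-- the grouped fold carries A's running total: A's fold from (acc + pvS d)
-- equals acc plus pvS of B's dict fold from d
theorem pv_group (ws : List (String × String)) :
    ∀ (d : PySem.Dict String Int) (acc : Int),
    ws.foldl (fun acc weight =>
      if weight.2 = "B" then acc + ((PySem.Int.ofStr? weight.1).getD 0)
      else if weight.2 = "KB" then acc + ((PySem.Int.ofStr? weight.1).getD 0) * 1024
      else if weight.2 = "MB" then acc + ((PySem.Int.ofStr? weight.1).getD 0) * 1024 ^ 2
      else if weight.2 = "GB" then acc + ((PySem.Int.ofStr? weight.1).getD 0) * 1024 ^ 3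
      else acc) (acc + pvS d)
    = acc + pvS (ws.foldl (fun d su =>
        if pvUNITS.contains su.2 then
          d.insert su.2 (d.getD su.2 0 + (PySem.Int.ofStr? su.1).getD 0)
        else d) d) := by
  induction ws with
  | nil => intro d acc; rfl
  | cons su rest ih =>
    intro d acc
    have hs := pvS_step d su
    simp only [List.foldl_cons]
    rw [← ih (if pvUNITS.contains su.2 then
          d.insert su.2 (d.getD su.2 0 + (PySem.Int.ofStr? su.1).getD 0)
        else d) acc]
    congr 1
    rw [hs]
    obtain ⟨w, u⟩ := su
    by_cases h1 : u = "B" <;> by_cases h2 : u = "KB" <;> by_cases h3 : u = "MB" <;>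
      by_cases h4 : u = "GB" <;> simp_all <;> try ring

-- phase 2's enumerate fold computes pvS of the grouped dict
theorem pv_total_eq (d : PySem.Dict String Int) :
    (PySem.List.enumerate pvUNITS).foldl
      (fun acc iu => acc + d.getD iu.2 0 * 1024 ^ iu.1.toNat) 0 = pvS d := by
  simp [pvUNITS, PySem.List.enumerate, pvS]

-- the recursive escalation equals the three unrolled if-blocks
theorem pv_conv_eq (t : Int) :
    pvEscalate t "B" ["KB", "MB", "GB"] =
      (let p1 := if t ≥ 1024 then (pyRoundDiv1024 t, "KB") else (t, "B")
       let p2 := if p1.1 ≥ 1024 then (pyRoundDiv1024 p1.1, "MB") else p1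
       let p3 := if p2.1 ≥ 1024 then (pyRoundDiv1024 p2.1, "GB") else p2
       PySem.Int.toStr p3.1 ++ " " ++ p3.2) := by
  by_cases h1 : t < 1024
  · simp [pvEscalate, h1, show ¬ t ≥ 1024 by omega]
  · by_cases h2 : pyRoundDiv1024 t < 1024
    · simp [pvEscalate, h1, h2, show t ≥ 1024 by omega,
        show ¬ pyRoundDiv1024 t ≥ 1024 by omega]
    · by_cases h3 : pyRoundDiv1024 (pyRoundDiv1024 t) < 1024
      · simp [pvEscalate, h1, h2, h3, show t ≥ 1024 by omega,
          show pyRoundDiv1024 t ≥ 1024 by omega,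
          show ¬ pyRoundDiv1024 (pyRoundDiv1024 t) ≥ 1024 by omega]
      · simp [pvEscalate, h1, h2, h3, show t ≥ 1024 by omega,
          show pyRoundDiv1024 t ≥ 1024 by omega,
          show pyRoundDiv1024 (pyRoundDiv1024 t) ≥ 1024 by omega]

-- ===== VERDICT (by name: the statement is the Claim_ definition above) =====
theorem sum_weights_spec : Claim_equal_sum_weights := by
  intro weights _ _
  unfold Spec_sum_weights sum_weights sum_weights_alt
  have hfold := pv_group weights PySem.Dict.empty 0
  have h0 : pvS PySem.Dict.empty = 0 := by decide
  rw [h0, add_zero, zero_add] at hfold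
  simp only [hfold, pv_total_eq]
  rw [show pvUNITS.headD "" = "B" from rfl,
    show pvUNITS.drop 1 = ["KB", "MB", "GB"] from rfl, pv_conv_eq]
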